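-- pv_equiv track=rewrite | github.com/docxology/MetaInformAnt | src/metainformant/information/metrics/advanced/semantic.py | _calculate_term_depth
-- ===== SOURCE A (Python) =====
-- from typing import Any, Dict, List, Optional, Set, Union
--
-- def _calculate_term_depth(term: str, hierarchy: Dict[str, Set[str]]) -> int:
--     """Calculate the depth of a term in the hierarchy.
--
--     Args:
--         term: Term to calculate depth for
--         hierarchy: Dictionary mapping terms to parents
--
--     Returns:
--         Depth (distance from root)
--     """
--     if term not in hierarchy or not hierarchy[term]:
--         return 0  # Root term
--
--     # Find maximum depth among parents
--     parent_depths = []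
--     for parent in hierarchy[term]:
--         if parent in hierarchy:  # Avoid infinite recursion
--             parent_depths.append(_calculate_term_depth(parent, hierarchy))
--
--     return 1 + max(parent_depths) if parent_depths else 1
-- ===== SOURCE B (Python) =====
-- def _calculate_term_depth(term, hierarchy):
--     # Bottom-up dynamic programming: Bellman-Ford style rounds over a whole
--     # depth table (stopping once it stabilises), instead of A's top-down
--     # recursion that revisits shared ancestors.
--     depth = {t: 0 for t in hierarchy}
--     for _ in range(len(hierarchy) + 1):
--         new = {t: _next_depth(hierarchy, depth, t) for t in hierarchy}
--         if new == depth: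
--             break
--         depth = new
--     return depth.get(term, 0)
--
--
-- def _next_depth(hierarchy, depth, t):
--     parents = hierarchy[t]
--     if not parents:
--         return 0
--     pd = [depth[p] for p in parents if p in hierarchy]
--     return 1 + max(pd) if pd else 1
-- ===== Notes on version B (the rewrite author's own statement) =====
-- stated objective: alternative
-- what changed: Replaces A's top-down naive recursion (which revisits shared ancestors) by bottom-up dynamic programming: Bellman-Ford style rounds recomputing a whole depth table until it stabilises, then a single lookup.
import Mathlib
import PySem

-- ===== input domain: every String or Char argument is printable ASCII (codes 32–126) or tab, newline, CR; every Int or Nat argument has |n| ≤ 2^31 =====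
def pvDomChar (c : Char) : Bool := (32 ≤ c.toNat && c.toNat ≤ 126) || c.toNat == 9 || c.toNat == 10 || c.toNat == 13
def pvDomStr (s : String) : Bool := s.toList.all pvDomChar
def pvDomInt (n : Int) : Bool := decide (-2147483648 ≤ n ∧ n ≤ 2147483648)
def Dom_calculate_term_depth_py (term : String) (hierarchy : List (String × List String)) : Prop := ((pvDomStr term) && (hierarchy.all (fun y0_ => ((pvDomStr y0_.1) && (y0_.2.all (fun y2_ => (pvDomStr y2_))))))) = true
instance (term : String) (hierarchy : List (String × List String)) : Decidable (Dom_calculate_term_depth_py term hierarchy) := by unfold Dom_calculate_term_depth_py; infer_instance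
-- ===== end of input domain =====

-- B replaces A's top-down naive recursion (which revisits shared ancestors) by a
-- bottom-up dynamic program: Bellman-Ford style rounds recomputing a whole depth
-- table, then a single lookup (alternative algorithm; not measured faster).


-- ===== PORT A =====
-- 'term in hierarchy' / 'hierarchy[term]' on the dict argument (first-match association lookup)
def pvLook (hierarchy : List (String × List String)) (t : String) : Option (List String) :=
  (PySem.Dict.mk hierarchy).get? t

-- A's recursion, with a fuel parameter: Python's recursion has no bound (it simply
-- diverges on a parent-cycle reachable from term — those inputs are outside Pre_ below);
-- fuel |hierarchy|+1 is enough on every Pre_ input since a recursion chain visits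
-- distinct keys (proved below: goA is fuel-independent past the ancestor rank).
def goA (hierarchy : List (String × List String)) : Nat → String → Int
  | 0, _ => 0
  | fuel+1, term =>
    match pvLook hierarchy term with
    | none => 0
    | some ps =>
      if ps = [] then 0
      else
        -- parent_depths: for parent in hierarchy[term]: if parent in hierarchy: append(rec)
        let pd := ps.foldl
          (fun acc p => if (pvLook hierarchy p).isSome then acc ++ [goA hierarchy fuel p] else acc)
          ([] : List Int)
        match PySem.List.max? pd (fun x => x) with
        | none => 1
        | some m => 1 + m

def calculate_term_depth_py (term : String) (hierarchy : List (String × List String)) : Int :=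
  goA hierarchy (hierarchy.length + 1) term

-- ===== PORT B =====
-- _next_depth(hierarchy, depth, t): only ever called with t a key of hierarchy,
-- so 'hierarchy[t]' is ported as getD with an (unreachable) [] default, and
-- 'depth[p]' (p a key, and every key is in the table) as getD with default 0.
def nextDepth (hierarchy : List (String × List String)) (depth : PySem.Dict String Int)
    (t : String) : Int :=
  let parents := (PySem.Dict.mk hierarchy).getD t []
  if parents = [] then 0
  else
    -- pd = [depth[p] for p in parents if p in hierarchy]
    let pd := (parents.filter (fun p => ((PySem.Dict.mk hierarchy).get? p).isSome)).map
      (fun p => depth.getD p 0)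
    match PySem.List.max? pd (fun x => x) with
    | none => 1
    | some m => 1 + m

-- depth = {t: _next_depth(hierarchy, depth, t) for t in hierarchy}
def roundB (hierarchy : List (String × List String)) (depth : PySem.Dict String Int) :
    PySem.Dict String Int :=
  ((PySem.Dict.mk hierarchy).keys).foldl
    (fun d t => d.insert t (nextDepth hierarchy depth t)) PySem.Dict.empty

-- for _ in range(len(hierarchy) + 1): new = {…}; if new == depth: break; depth = new
-- (Python's dict == ignores key order, Lean's = on Dict compares the items list;
--  exact here because both tables are built by the same fold over the same keys)
def iterB (hierarchy : List (String × List String)) :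
    Nat → PySem.Dict String Int → PySem.Dict String Int
  | 0, d => d
  | k+1, d =>
    let d' := roundB hierarchy d
    if d' = d then d else iterB hierarchy k d'

def calculate_term_depth_py_alt (term : String) (hierarchy : List (String × List String)) : Int :=
  -- depth = {t: 0 for t in hierarchy}
  let init := ((PySem.Dict.mk hierarchy).keys).foldl
    (fun d t => d.insert t (0 : Int)) PySem.Dict.empty
  (iterB hierarchy (hierarchy.length + 1) init).getD term 0

-- ===== PRECONDITION & SPEC =====
-- parents of t that are themselves keys (the only edges A recurses through)
def keyParents (hierarchy : List (String × List String)) (t : String) : List String :=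
  ((pvLook hierarchy t).getD []).filter (fun p => (pvLook hierarchy p).isSome)

-- one saturation step of reachability through keyParents
def reachStep (hierarchy : List (String × List String)) (s : PySem.Set String) : PySem.Set String :=
  s.foldl (fun acc t => PySem.Set.update acc (keyParents hierarchy t)) s

def reachIter (hierarchy : List (String × List String)) : Nat → PySem.Set String → PySem.Set String
  | 0, s => s
  | k+1, s => reachIter hierarchy k (reachStep hierarchy s)

-- number of strict ancestors of t (|hierarchy| saturation steps reach every ancestor)
def ancRank (hierarchy : List (String × List String)) (t : String) : Nat :=
  (reachIter hierarchy hierarchy.length (PySem.Set.ofList (keyParents hierarchy t))).length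

-- Pre_ excludes exactly the inputs on which the Python A diverges (RecursionError):
-- those with a parent-cycle reachable from term through keys. It is the closed-form
-- DAG condition "the ancestor set of term is closed and the strict-ancestor count
-- drops along every parent edge" — a graph property of the input, not a run of a port.
def Pre_calculate_term_depth_py (term : String) (hierarchy : List (String × List String)) : Prop :=
  ∀ t ∈ reachIter hierarchy hierarchy.length (PySem.Set.ofList [term]),
    ∀ p ∈ keyParents hierarchy t,
      p ∈ reachIter hierarchy hierarchy.length (PySem.Set.ofList [term]) ∧
        ancRank hierarchy p < ancRank hierarchy t
instance (term : String) (hierarchy : List (String × List String)) : Decidable (Pre_calculate_term_depth_py term hierarchy) := by unfold Pre_calculate_term_depth_py; infer_instance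

def pvWitness_calculate_term_depth_py : String × (List (String × List String)) :=
  ("a", [("a", ["b"]), ("b", [])])

def Spec_calculate_term_depth_py (term : String) (hierarchy : List (String × List String)) (out : Int) : Prop := out = calculate_term_depth_py_alt term hierarchy
instance (term : String) (hierarchy : List (String × List String)) (out : Int) : Decidable (Spec_calculate_term_depth_py term hierarchy out) := by unfold Spec_calculate_term_depth_py; infer_instance

-- ===== CLAIM (what is proved, stated in full; the proofs are below) =====
def Claim_equal_calculate_term_depth_py : Prop := ∀ (term : String) (hierarchy : List (String × List String)), Dom_calculate_term_depth_py term hierarchy → Pre_calculate_term_depth_py term hierarchy → Spec_calculate_term_depth_py term hierarchy (calculate_term_depth_py term hierarchy)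

-- ===== LEMMAS AND PROOFS =====

-- the canonical depth: goA at just enough fuel (goA_stab below: any larger fuel agrees)
def pvDepth (hierarchy : List (String × List String)) (t : String) : Int :=
  goA hierarchy (ancRank hierarchy t + 1) t

lemma mem_foldl_update_left (kp : String → List String) (l : List String) (x : String) :
    ∀ (acc : PySem.Set String), x ∈ acc →
      x ∈ l.foldl (fun a t => PySem.Set.update a (kp t)) acc := by
  induction l with
  | nil => intro acc hx; exact hx
  | cons t l ih =>
    intro acc hx
    rw [List.foldl_cons]
    exact ih _ ((PySem.Set.mem_update _ _ _).2 (Or.inl hx))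

lemma mem_foldl_update_iff (kp : String → List String) (l : List String) (x : String) :
    ∀ (acc : PySem.Set String),
      (x ∈ l.foldl (fun a t => PySem.Set.update a (kp t)) acc ↔
        x ∈ acc ∨ ∃ t ∈ l, x ∈ kp t) := by
  induction l with
  | nil => intro acc; simp
  | cons t l ih =>
    intro acc
    rw [List.foldl_cons]
    simp only [ih, PySem.Set.mem_update, List.mem_cons, exists_eq_or_imp]
    tauto

lemma mem_reachIter_of_mem (hierarchy : List (String × List String)) :
    ∀ (k : Nat) (s : PySem.Set String) (x : String), x ∈ s → x ∈ reachIter hierarchy k s := by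
  intro k
  induction k with
  | zero => intro s x hx; exact hx
  | succ k ih =>
    intro s x hx
    refine ih (reachStep hierarchy s) x ?_
    unfold reachStep
    exact mem_foldl_update_left _ _ _ _ hx

lemma term_mem_reach (term : String) (hierarchy : List (String × List String)) :
    term ∈ reachIter hierarchy hierarchy.length (PySem.Set.ofList [term]) :=
  mem_reachIter_of_mem hierarchy _ _ term (by simp [PySem.Set.mem_ofList])

lemma nodup_reachIter (hierarchy : List (String × List String)) :
    ∀ (k : Nat) (s : PySem.Set String), s.Nodup → (reachIter hierarchy k s).Nodup := by
  intro k
  induction k with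
  | zero => intro s hs; exact hs
  | succ k ih =>
    intro s hs
    apply ih
    unfold reachStep
    have gen : ∀ (l : List String) (acc : PySem.Set String), acc.Nodup →
        (l.foldl (fun a t => PySem.Set.update a (keyParents hierarchy t)) acc).Nodup := by
      intro l
      induction l with
      | nil => intro acc h; exact h
      | cons t l ihl =>
        intro acc h
        rw [List.foldl_cons]
        exact ihl _ (PySem.Set.nodup_update _ _ h)
    exact gen s s hs

lemma keys_reachIter (hierarchy : List (String × List String)) :
    ∀ (k : Nat) (s : PySem.Set String), (∀ x ∈ s, (pvLook hierarchy x).isSome) →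
      ∀ x ∈ reachIter hierarchy k s, (pvLook hierarchy x).isSome := by
  intro k
  induction k with
  | zero => intro s hs; exact hs
  | succ k ih =>
    intro s hs
    apply ih
    intro x hx
    unfold reachStep at hx
    rcases (mem_foldl_update_iff _ _ _ _).1 hx with hx | ⟨t, _, hx⟩
    · exact hs x hx
    · unfold keyParents at hx
      exact (List.mem_filter.1 hx).2

lemma isSome_pvLook_mem_keys (hierarchy : List (String × List String)) (x : String)
    (h : (pvLook hierarchy x).isSome) : x ∈ hierarchy.map Prod.fst := by
  by_contra hx
  have hn : pvLook hierarchy x = none := by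
    unfold pvLook
    rw [PySem.Dict.get?_eq_none_iff_not_mem_keys]
    simpa using hx
  rw [hn] at h
  simp at h

lemma ancRank_le (hierarchy : List (String × List String)) (t : String) :
    ancRank hierarchy t ≤ hierarchy.length := by
  unfold ancRank
  set l := reachIter hierarchy hierarchy.length (PySem.Set.ofList (keyParents hierarchy t)) with hl
  have hnd : l.Nodup := nodup_reachIter hierarchy _ _ (PySem.Set.nodup_ofList _)
  have hkeys : ∀ x ∈ l, x ∈ hierarchy.map Prod.fst := by
    intro x hx
    apply isSome_pvLook_mem_keys
    refine keys_reachIter hierarchy _ _ ?_ x hx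
    intro y hy
    have hmem := (PySem.Set.mem_ofList _ _).1 hy
    unfold keyParents at hmem
    exact (List.mem_filter.1 hmem).2
  calc l.length = l.toFinset.card := (List.toFinset_card_of_nodup hnd).symm
    _ ≤ (hierarchy.map Prod.fst).toFinset.card := by
        apply Finset.card_le_card
        intro x hx
        simp only [List.mem_toFinset] at *
        exact hkeys x hx
    _ ≤ (hierarchy.map Prod.fst).length := List.toFinset_card_le _
    _ = hierarchy.length := by simp

-- key parents of t, read off a port's lookup
lemma mem_keyParents_of (hierarchy : List (String × List String)) {t p : String} {ps : List String}
    (hl : pvLook hierarchy t = some ps) (hp : p ∈ ps) (hs : (pvLook hierarchy p).isSome) :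
    p ∈ keyParents hierarchy t := by
  unfold keyParents
  rw [hl]
  exact List.mem_filter.2 ⟨hp, hs⟩

-- fuel stability: past the ancestor rank, goA does not depend on the fuel
lemma goA_stab (term : String) (hierarchy : List (String × List String))
    (hp : Pre_calculate_term_depth_py term hierarchy) :
    ∀ (r : Nat) (t : String),
      t ∈ reachIter hierarchy hierarchy.length (PySem.Set.ofList [term]) →
      ancRank hierarchy t < r →
      ∀ f1 f2, ancRank hierarchy t < f1 → ancRank hierarchy t < f2 →
        goA hierarchy f1 t = goA hierarchy f2 t := by
  intro r
  induction r with
  | zero => intro t _ hr; omega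
  | succ r ih =>
    intro t htR hr f1 f2 hf1 hf2
    obtain ⟨a, rfl⟩ : ∃ a, f1 = a + 1 := ⟨f1 - 1, by omega⟩
    obtain ⟨b, rfl⟩ : ∃ b, f2 = b + 1 := ⟨f2 - 1, by omega⟩
    cases hl : pvLook hierarchy t with
    | none => simp only [goA, hl]
    | some ps =>
      simp only [goA, hl]
      by_cases hps : ps = []
      · rw [if_pos hps, if_pos hps]
      · rw [if_neg hps, if_neg hps]
        have hpd : ps.foldl
            (fun acc p => if (pvLook hierarchy p).isSome then acc ++ [goA hierarchy a p] else acc)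
            ([] : List Int)
          = ps.foldl
            (fun acc p => if (pvLook hierarchy p).isSome then acc ++ [goA hierarchy b p] else acc)
            ([] : List Int) := by
          apply PySem.List.foldl_congr_mem
          intro acc p hmem
          by_cases hs : (pvLook hierarchy p).isSome
          · obtain ⟨hpR, hrank⟩ := hp t htR p (mem_keyParents_of hierarchy hl hmem hs)
            rw [ih p hpR (by omega) a b (by omega) (by omega)]
          · simp [hs]
        rw [hpd]

-- table lookup after one comprehension round: every key is (re)bound to nextDepth
lemma get?_foldl_insert_val (f : String → Int) (x : String) :
    ∀ (l : List String) (acc : PySem.Dict String Int),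
      (l.foldl (fun d t => d.insert t (f t)) acc).get? x
        = if x ∈ l then some (f x) else acc.get? x := by
  intro l
  induction l with
  | nil => intro acc; simp
  | cons t l ih =>
    intro acc
    rw [List.foldl_cons, ih]
    by_cases hxl : x ∈ l
    · simp [hxl]
    · rw [if_neg hxl, PySem.Dict.get?_insert]
      by_cases hxt : x = t
      · simp [hxt]
      · simp [hxt, List.mem_cons, hxl]

-- the table invariant: after k rounds every reachable key of rank < k is correct
def GoodTbl (hierarchy : List (String × List String)) (term : String) (k : Nat)
    (d : PySem.Dict String Int) : Prop :=
  ∀ t ∈ reachIter hierarchy hierarchy.length (PySem.Set.ofList [term]),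
    (pvLook hierarchy t).isSome → ancRank hierarchy t < k →
      d.get? t = some (pvDepth hierarchy t)

lemma goodTbl_round (term : String) (hierarchy : List (String × List String))
    (hp : Pre_calculate_term_depth_py term hierarchy) (k : Nat) (d : PySem.Dict String Int)
    (hg : GoodTbl hierarchy term k d) :
    GoodTbl hierarchy term (k + 1) (roundB hierarchy d) := by
  intro t htR hkey hrank
  obtain ⟨ps, hl⟩ := Option.isSome_iff_exists.1 hkey
  have htk : t ∈ (PySem.Dict.mk hierarchy).keys := by
    by_contra hc
    rw [← PySem.Dict.get?_eq_none_iff_not_mem_keys] at hc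
    rw [pvLook] at hl
    rw [hc] at hl
    cases hl
  unfold roundB
  rw [get?_foldl_insert_val (nextDepth hierarchy d) t _ _, if_pos htk]
  congr 1
  -- nextDepth at t computes the canonical depth
  have hgetD : (PySem.Dict.mk hierarchy).getD t [] = ps := by
    rw [PySem.Dict.getD_eq_get?_getD]
    rw [pvLook] at hl
    rw [hl]
    rfl
  unfold nextDepth
  rw [hgetD]
  unfold pvDepth
  simp only [goA, hl]
  by_cases hps : ps = []
  · rw [if_pos hps, if_pos hps]
  · rw [if_neg hps, if_neg hps]
    have hmap : (ps.filter (fun p => ((PySem.Dict.mk hierarchy).get? p).isSome)).map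
          (fun p => d.getD p 0)
        = (ps.filter (fun p => ((PySem.Dict.mk hierarchy).get? p).isSome)).map
          (goA hierarchy (ancRank hierarchy t)) := by
      apply List.map_congr_left
      intro p hpf
      have hpmem := List.mem_filter.1 hpf
      have hs : (pvLook hierarchy p).isSome := by
        rw [pvLook]; exact hpmem.2
      obtain ⟨hpR, hprank⟩ := hp t htR p (mem_keyParents_of hierarchy hl hpmem.1 hs)
      have hget := hg p hpR hs (by omega)
      rw [PySem.Dict.getD_eq_get?_getD, hget]
      show pvDepth hierarchy p = _
      unfold pvDepth
      exact goA_stab term hierarchy hp (ancRank hierarchy t) p hpR hprank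
        (ancRank hierarchy p + 1) (ancRank hierarchy t) (by omega) hprank
    have hfold : ps.foldl
        (fun acc p => if (pvLook hierarchy p).isSome then
            acc ++ [goA hierarchy (ancRank hierarchy t) p] else acc) ([] : List Int)
      = (ps.filter (fun p => ((PySem.Dict.mk hierarchy).get? p).isSome)).map
          (goA hierarchy (ancRank hierarchy t)) := by
      have := PySem.List.foldl_append_if
        (fun p => (pvLook hierarchy p).isSome) (goA hierarchy (ancRank hierarchy t))
        (l := ps) (acc := ([] : List Int))
      simpa [pvLook] using this
    rw [hmap, hfold]

lemma goodTbl_iter (term : String) (hierarchy : List (String × List String))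
    (hp : Pre_calculate_term_depth_py term hierarchy) :
    ∀ (k j : Nat) (d : PySem.Dict String Int), GoodTbl hierarchy term j d →
      GoodTbl hierarchy term (j + k) (iterB hierarchy k d) := by
  intro k
  induction k with
  | zero => intro j d h; exact h
  | succ k ih =>
    intro j d h
    show GoodTbl hierarchy term (j + (k + 1))
      (if roundB hierarchy d = d then d else iterB hierarchy k (roundB hierarchy d))
    by_cases hfix : roundB hierarchy d = d
    · rw [if_pos hfix]
      -- a fixpoint of the round stays correct at every later round count
      have hm : ∀ m, GoodTbl hierarchy term (j + m) d := by
        intro m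
        induction m with
        | zero => exact h
        | succ m ihm =>
          have := goodTbl_round term hierarchy hp (j + m) d ihm
          rw [hfix] at this
          exact this
      exact hm (k + 1)
    · rw [if_neg hfix]
      have := ih (j + 1) (roundB hierarchy d) (goodTbl_round term hierarchy hp j d h)
      have heq : j + 1 + k = j + (k + 1) := by omega
      rw [heq] at this
      exact this

-- a non-key never enters the table
lemma get?_iterB_none (hierarchy : List (String × List String)) (x : String)
    (hx : x ∉ (PySem.Dict.mk hierarchy).keys) :
    ∀ (k : Nat) (d : PySem.Dict String Int), d.get? x = none →
      (iterB hierarchy k d).get? x = none := by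
  intro k
  induction k with
  | zero => intro d h; exact h
  | succ k ih =>
    intro d h
    show (if roundB hierarchy d = d then d else iterB hierarchy k (roundB hierarchy d)).get? x
        = none
    have hr : (roundB hierarchy d).get? x = none := by
      unfold roundB
      rw [get?_foldl_insert_val (nextDepth hierarchy d) x _ _, if_neg hx]
      exact PySem.Dict.get?_empty x
    by_cases hfix : roundB hierarchy d = d
    · rw [if_pos hfix]; exact h
    · rw [if_neg hfix]; exact ih (roundB hierarchy d) hr

-- the two ports agree on every Pre_ input
lemma ports_agree (term : String) (hierarchy : List (String × List String))
    (hp : Pre_calculate_term_depth_py term hierarchy) :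
    calculate_term_depth_py term hierarchy = calculate_term_depth_py_alt term hierarchy := by
  have htR := term_mem_reach term hierarchy
  have hle := ancRank_le hierarchy term
  have hinit : GoodTbl hierarchy term 0
      (((PySem.Dict.mk hierarchy).keys).foldl
        (fun d t => d.insert t (0 : Int)) PySem.Dict.empty) := by
    intro t _ _ hr; omega
  have hgood := goodTbl_iter term hierarchy hp (hierarchy.length + 1) 0 _ hinit
  unfold calculate_term_depth_py calculate_term_depth_py_alt
  cases hl : pvLook hierarchy term with
  | none =>
    have hA : goA hierarchy (hierarchy.length + 1) term = 0 := by
      simp only [goA, hl]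
    have hxk : term ∉ (PySem.Dict.mk hierarchy).keys := by
      rw [← PySem.Dict.get?_eq_none_iff_not_mem_keys]
      exact hl
    have hnone := get?_iterB_none hierarchy term hxk (hierarchy.length + 1) _ (by
      rw [get?_foldl_insert_val (fun _ => (0 : Int)) term _ _, if_neg hxk]
      exact PySem.Dict.get?_empty term)
    rw [hA, PySem.Dict.getD_eq_get?_getD, hnone]
    rfl
  | some ps =>
    have hkey : (pvLook hierarchy term).isSome := by rw [hl]; rfl
    have hget := hgood term htR hkey (by omega)
    rw [PySem.Dict.getD_eq_get?_getD, hget]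
    show goA hierarchy (hierarchy.length + 1) term = pvDepth hierarchy term
    unfold pvDepth
    exact goA_stab term hierarchy hp (ancRank hierarchy term + 1) term htR (by omega)
      (hierarchy.length + 1) (ancRank hierarchy term + 1) (by omega) (by omega)

-- ===== VERDICT (by name: the statement is the Claim_ definition above) =====
theorem calculate_term_depth_py_spec : Claim_equal_calculate_term_depth_py := by
  intro term hierarchy _ hp
  exact ports_agree term hierarchy hp
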